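-- pv_equiv track=rewrite | github.com/elbek-hacker/phyton_darslari | ImtihonMasalalar/2-day/DasturlashAsoslari/Funksiya/misol10.py | uchta_yigindi_nol
-- ===== SOURCE A (Python) =====
-- def uchta_yigindi_nol(lst):
--     n = len(lst)
--     triplet = []
--     used_indices = set()
--
--     # Uchlikni topish
--     for i in range(n):
--         for j in range(i+1, n):
--             for k in range(j+1, n):
--                 if lst[i] + lst[j] + lst[k] == 0:
--                     triplet = [lst[i], lst[j], lst[k]]
--                     used_indices = {i, j, k}
--                     break
--             if triplet:
--                 break
--         if triplet:
--             break
--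
--     if not triplet:
--         return [[], lst]  # Agar topilmasa
--
--     # Qolgan elementlarni yig'ish
--     remaining = [lst[i] for i in range(n) if i not in used_indices]
--     return [triplet, remaining]
-- ===== SOURCE B (Python) =====
-- def _first_greater(ids, j):
--     # binary search: smallest index lo with ids[lo] > j (ids strictly increasing)
--     lo, hi = 0, len(ids)
--     while lo < hi:
--         mid = (lo + hi) // 2
--         if ids[mid] <= j:
--             lo = mid + 1
--         else:
--             hi = mid
--     return ids[lo] if lo < len(ids) else None
--
--
-- def uchta_yigindi_nol(lst):
--     n = len(lst)
--     pos = {}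
--     for idx in range(n):
--         pos.setdefault(lst[idx], []).append(idx)
--     for i in range(n):
--         for j in range(i + 1, n):
--             target = -(lst[i] + lst[j])
--             ids = pos.get(target)
--             if ids is None:
--                 continue
--             k = _first_greater(ids, j)
--             if k is not None:
--                 triplet = [lst[i], lst[j], lst[k]]
--                 remaining = [lst[m] for m in range(n) if m != i and m != j and m != k]
--                 return [triplet, remaining]
--     return [[], lst]
-- ===== Notes on version B (the rewrite author's own statement) =====
-- stated objective: faster
-- what changed: Replaced the innermost scan over all k>j by a precomputed value->sorted-index map plus a binary search for the smallest index k>j holding the needed third value, turning O(n^3) into O(n^2 log n).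
import Mathlib
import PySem

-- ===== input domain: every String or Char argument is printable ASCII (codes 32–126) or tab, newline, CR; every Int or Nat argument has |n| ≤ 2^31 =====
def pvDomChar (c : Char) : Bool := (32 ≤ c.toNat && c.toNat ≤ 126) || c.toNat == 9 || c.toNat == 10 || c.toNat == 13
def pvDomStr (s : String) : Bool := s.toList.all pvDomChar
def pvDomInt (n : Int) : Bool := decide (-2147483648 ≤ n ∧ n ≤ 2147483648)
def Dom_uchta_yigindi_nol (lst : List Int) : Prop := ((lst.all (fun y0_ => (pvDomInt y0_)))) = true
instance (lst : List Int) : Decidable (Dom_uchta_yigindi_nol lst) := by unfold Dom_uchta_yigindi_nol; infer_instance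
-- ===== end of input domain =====

-- B replaces A's innermost k-scan by a precomputed value→index-list map plus a binary
-- search for the smallest index k>j carrying the needed third value (objective: faster).

-- ===== PORT A =====
-- innermost 'for k in range(j+1, n)' with break-on-found
def pvA_loopK (lst : List Int) (i j : Nat) : List Nat → Option (List Int × PySem.Set Nat)
  | [] => none
  | k :: ks =>
    if lst.getD i 0 + lst.getD j 0 + lst.getD k 0 = 0 then
      some ([lst.getD i 0, lst.getD j 0, lst.getD k 0], PySem.Set.ofList [i, j, k])
    else pvA_loopK lst i j ks

-- 'for j in range(i+1, n)' with break once triplet is non-empty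
def pvA_loopJ (lst : List Int) (n i : Nat) : List Nat → Option (List Int × PySem.Set Nat)
  | [] => none
  | j :: js =>
    match pvA_loopK lst i j (List.range' (j + 1) (n - (j + 1))) with
    | some r => some r
    | none => pvA_loopJ lst n i js

-- 'for i in range(n)' with break once triplet is non-empty
def pvA_loopI (lst : List Int) (n : Nat) : List Nat → Option (List Int × PySem.Set Nat)
  | [] => none
  | i :: is =>
    match pvA_loopJ lst n i (List.range' (i + 1) (n - (i + 1))) with
    | some r => some r
    | none => pvA_loopI lst n is

def uchta_yigindi_nol (lst : List Int) : List (List Int) :=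
  let n := lst.length
  match pvA_loopI lst n (List.range n) with
  | none => [[], lst]
  | some (t, used) =>
    [t, ((List.range n).filter (fun m => !(PySem.Set.contains used m))).map (fun m => lst.getD m 0)]

-- ===== PORT B =====
-- pos.setdefault(lst[idx], []).append(idx) over idx in range(n)
def pvB_buildPos (lst : List Int) : PySem.Dict Int (List Nat) :=
  (List.range lst.length).foldl
    (fun d m => d.insert (lst.getD m 0) (d.getD (lst.getD m 0) [] ++ [m])) PySem.Dict.empty

-- _first_greater's while-loop: lo, hi binary search
def pvB_fgLoop (ids : List Nat) (j : Nat) (lo hi : Nat) : Nat :=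
  if _h : lo < hi then
    let mid := (lo + hi) / 2
    if ids.getD mid 0 ≤ j then pvB_fgLoop ids j (mid + 1) hi else pvB_fgLoop ids j lo mid
  else lo
termination_by hi - lo
decreasing_by all_goals omega

-- _first_greater(ids, j)
def pvB_firstGreater (ids : List Nat) (j : Nat) : Option Nat :=
  let lo := pvB_fgLoop ids j 0 ids.length
  if _h : lo < ids.length then some (ids.getD lo 0) else none

-- 'for j in range(i+1, n)': dict lookup + binary search, early return on hit
def pvB_loopJ (lst : List Int) (pos : PySem.Dict Int (List Nat)) (i : Nat) :
    List Nat → Option (Nat × Nat × Nat)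
  | [] => none
  | j :: js =>
    match pos.get? (-(lst.getD i 0 + lst.getD j 0)) with
    | none => pvB_loopJ lst pos i js
    | some ids =>
      match pvB_firstGreater ids j with
      | some k => some (i, j, k)
      | none => pvB_loopJ lst pos i js

-- 'for i in range(n)'
def pvB_loopI (lst : List Int) (pos : PySem.Dict Int (List Nat)) (n : Nat) :
    List Nat → Option (Nat × Nat × Nat)
  | [] => none
  | i :: is =>
    match pvB_loopJ lst pos i (List.range' (i + 1) (n - (i + 1))) with
    | some r => some r
    | none => pvB_loopI lst pos n is

def uchta_yigindi_nol_alt (lst : List Int) : List (List Int) :=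
  let n := lst.length
  match pvB_loopI lst (pvB_buildPos lst) n (List.range n) with
  | none => [[], lst]
  | some (i, j, k) =>
    [[lst.getD i 0, lst.getD j 0, lst.getD k 0],
     ((List.range n).filter (fun m => m != i && m != j && m != k)).map (fun m => lst.getD m 0)]

-- ===== PRECONDITION & SPEC =====
def Spec_uchta_yigindi_nol (lst : List Int) (out : List (List Int)) : Prop := out = uchta_yigindi_nol_alt lst
instance (lst : List Int) (out : List (List Int)) : Decidable (Spec_uchta_yigindi_nol lst out) := by unfold Spec_uchta_yigindi_nol; infer_instance

-- ===== CLAIM (what is proved, stated in full; the proofs are below) =====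
def Claim_equal_uchta_yigindi_nol : Prop := ∀ (lst : List Int), Dom_uchta_yigindi_nol lst → Spec_uchta_yigindi_nol lst (uchta_yigindi_nol lst)

-- ===== LEMMAS AND PROOFS =====

-- the common "inner result": first k in range(j+1, n) with lst[i]+lst[j]+lst[k] == 0
def pvInner (lst : List Int) (n i j : Nat) : Option Nat :=
  (List.range' (j + 1) (n - (j + 1))).find?
    (fun k => decide (lst.getD i 0 + lst.getD j 0 + lst.getD k 0 = 0))

-- packaging of a found index triple into A's (triplet, used-set) pair
def pvPack (lst : List Int) (ijk : Nat × Nat × Nat) : List Int × PySem.Set Nat :=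
  ([lst.getD ijk.1 0, lst.getD ijk.2.1 0, lst.getD ijk.2.2 0],
   PySem.Set.ofList [ijk.1, ijk.2.1, ijk.2.2])

lemma pvA_loopK_eq (lst : List Int) (i j : Nat) (ks : List Nat) :
    pvA_loopK lst i j ks =
      (ks.find? (fun k => decide (lst.getD i 0 + lst.getD j 0 + lst.getD k 0 = 0))).map
        (fun k => pvPack lst (i, j, k)) := by
  induction ks with
  | nil => simp [pvA_loopK]
  | cons k ks ih =>
    rw [pvA_loopK, List.find?_cons]
    by_cases h : lst.getD i 0 + lst.getD j 0 + lst.getD k 0 = 0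
    all_goals simp only [List.getD_eq_getElem?_getD] at h
    · simp [h, pvPack]
    · simp [h, ih]

lemma pvB_buildPos_getD (lst : List Int) (t : Int) :
    (pvB_buildPos lst).getD t [] =
      (List.range lst.length).filter (fun m => decide (lst.getD m 0 = t)) := by
  have main : ∀ (ms : List Nat) (d : PySem.Dict Int (List Nat)),
      (ms.foldl (fun d m => d.insert (lst.getD m 0) (d.getD (lst.getD m 0) [] ++ [m])) d).getD t []
        = d.getD t [] ++ ms.filter (fun m => decide (lst.getD m 0 = t)) := by
    intro ms
    induction ms with
    | nil => intro d; simp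
    | cons m ms ih =>
      intro d
      rw [List.foldl_cons, ih, List.filter_cons]
      by_cases h : lst.getD m 0 = t
      all_goals simp only [List.getD_eq_getElem?_getD] at h
      · simp [h]
      · rw [PySem.Dict.getD_insert]
        simp [h, Ne.symm h]
  have := main (List.range lst.length) PySem.Dict.empty
  simpa [pvB_buildPos] using this

lemma pvIds_sorted (lst : List Int) (t : Int) (a b : Nat)
    (hab : a ≤ b) (hb : b < ((List.range lst.length).filter (fun m => decide (lst.getD m 0 = t))).length) :
    ((List.range lst.length).filter (fun m => decide (lst.getD m 0 = t))).getD a 0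
      ≤ ((List.range lst.length).filter (fun m => decide (lst.getD m 0 = t))).getD b 0 := by
  have hp : ((List.range lst.length).filter (fun m => decide (lst.getD m 0 = t))).Pairwise (· < ·) :=
    List.Pairwise.sublist List.filter_sublist List.pairwise_lt_range
  rcases eq_or_lt_of_le hab with rfl | hlt
  · exact le_refl _
  · have hx := List.pairwise_iff_getElem.mp hp a b (lt_trans hlt hb) hb hlt
    rw [List.getD_eq_getElem _ _ (lt_trans hlt hb), List.getD_eq_getElem _ _ hb]
    exact le_of_lt hx

lemma pvB_fgLoop_spec (ids : List Nat) (j : Nat)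
    (hsort : ∀ a b, a ≤ b → b < ids.length → ids.getD a 0 ≤ ids.getD b 0) :
    ∀ lo hi, lo ≤ hi → hi ≤ ids.length →
    (∀ m, m < lo → ids.getD m 0 ≤ j) →
    (∀ m, hi ≤ m → m < ids.length → j < ids.getD m 0) →
    (∀ m, m < pvB_fgLoop ids j lo hi → ids.getD m 0 ≤ j) ∧
    (∀ m, pvB_fgLoop ids j lo hi ≤ m → m < ids.length → j < ids.getD m 0) ∧
    pvB_fgLoop ids j lo hi ≤ ids.length := by
  suffices H : ∀ d lo hi, hi - lo ≤ d → lo ≤ hi → hi ≤ ids.length →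
      (∀ m, m < lo → ids.getD m 0 ≤ j) →
      (∀ m, hi ≤ m → m < ids.length → j < ids.getD m 0) →
      (∀ m, m < pvB_fgLoop ids j lo hi → ids.getD m 0 ≤ j) ∧
      (∀ m, pvB_fgLoop ids j lo hi ≤ m → m < ids.length → j < ids.getD m 0) ∧
      pvB_fgLoop ids j lo hi ≤ ids.length by
    intro lo hi h1 h2 h3 h4
    exact H (hi - lo) lo hi le_rfl h1 h2 h3 h4
  intro d
  induction d with
  | zero =>
    intro lo hi hd hle hhi hlow hhigh
    have hnl : ¬ lo < hi := by omega
    rw [pvB_fgLoop]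
    simp only [hnl, dite_false]
    exact ⟨hlow, fun m hm hml => hhigh m (by omega) hml, by omega⟩
  | succ d ih =>
    intro lo hi hd hle hhi hlow hhigh
    rw [pvB_fgLoop]
    by_cases h : lo < hi
    · simp only [h, dite_true]
      by_cases hc : ids.getD ((lo + hi) / 2) 0 ≤ j
      · simp only [hc, if_true]
        refine ih ((lo + hi) / 2 + 1) hi (by omega) (by omega) hhi ?_ hhigh
        intro m hm
        exact le_trans (hsort m ((lo + hi) / 2) (by omega) (by omega)) hc
      · simp only [hc, if_false]
        refine ih lo ((lo + hi) / 2) (by omega) (by omega) (by omega) hlow ?_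
        intro m hm hml
        exact lt_of_lt_of_le (Nat.lt_of_not_le hc) (hsort ((lo + hi) / 2) m hm hml)
    · simp only [h, dite_false]
      exact ⟨hlow, fun m hm hml => hhigh m (by omega) hml, by omega⟩

lemma pvFind?_gt_of (ids : List Nat) (j r : Nat) (hr : r ≤ ids.length)
    (h1 : ∀ m, m < r → ids.getD m 0 ≤ j)
    (h2 : ∀ m, r ≤ m → m < ids.length → j < ids.getD m 0) :
    ids.find? (fun m => decide (j < m)) =
      if _h : r < ids.length then some (ids.getD r 0) else none := by
  induction ids generalizing r with
  | nil => simp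
  | cons a tl ih =>
    cases r with
    | zero =>
      have ha : j < a := by simpa using h2 0 (le_refl 0) (by simp)
      simp [ha]
    | succ r' =>
      have ha : a ≤ j := by simpa using h1 0 (Nat.succ_pos r')
      rw [List.find?_cons]
      have hna : ¬ j < a := by omega
      simp only [hna, decide_false]
      rw [ih r' (by simpa [Nat.succ_le_succ_iff] using hr)
        (fun m hm => by simpa using h1 (m + 1) (by omega))
        (fun m hm hml => by simpa using h2 (m + 1) (by omega) (by simpa using Nat.succ_lt_succ hml))]
      by_cases hlt : r' < tl.length
      · simp [hlt]
      · simp [hlt]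

lemma pvB_firstGreater_eq (ids : List Nat) (j : Nat)
    (hsort : ∀ a b, a ≤ b → b < ids.length → ids.getD a 0 ≤ ids.getD b 0) :
    pvB_firstGreater ids j = ids.find? (fun m => decide (j < m)) := by
  obtain ⟨H1, H2, H3⟩ := pvB_fgLoop_spec ids j hsort 0 ids.length (Nat.zero_le _) le_rfl
    (fun m hm => absurd hm (Nat.not_lt_zero m)) (fun m hm hml => absurd hml (by omega))
  rw [pvFind?_gt_of ids j (pvB_fgLoop ids j 0 ids.length) H3 H1 H2]
  rfl

lemma pvFind?_congr {p q : Nat → Bool} (l : List Nat) (h : ∀ x ∈ l, p x = q x) :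
    l.find? p = l.find? q := by
  induction l with
  | nil => rfl
  | cons a tl ih =>
    rw [List.find?_cons, List.find?_cons, h a List.mem_cons_self]
    cases q a
    · exact ih (fun x hx => h x (List.mem_cons_of_mem _ hx))
    · rfl

lemma pvKey (lst : List Int) (i j : Nat) (hj : j < lst.length) :
    (match (pvB_buildPos lst).get? (-(lst.getD i 0 + lst.getD j 0)) with
     | none => none
     | some ids => pvB_firstGreater ids j) = pvInner lst lst.length i j := by
  cases hq : (pvB_buildPos lst).get? (-(lst.getD i 0 + lst.getD j 0)) with
  | none =>
    have hg : (List.range lst.length).filter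
        (fun m => decide (lst.getD m 0 = -(lst.getD i 0 + lst.getD j 0))) = [] := by
      rw [← pvB_buildPos_getD]
      simp only [PySem.Dict.getD, hq]
      rfl
    have hnone : ∀ m, m < lst.length → lst.getD m 0 ≠ -(lst.getD i 0 + lst.getD j 0) := by
      intro m hm
      have := List.filter_eq_nil_iff.mp hg m (List.mem_range.mpr hm)
      simpa using this
    simp only [pvInner]
    symm
    rw [List.find?_eq_none]
    intro k hk
    have hk' := List.mem_range'_1.mp hk
    have hkn : k < lst.length := by omega
    have := hnone k hkn
    simp only [decide_eq_true_eq]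
    omega
  | some ids =>
    have hg : (List.range lst.length).filter
        (fun m => decide (lst.getD m 0 = -(lst.getD i 0 + lst.getD j 0))) = ids := by
      rw [← pvB_buildPos_getD]
      simp only [PySem.Dict.getD, hq]
      rfl
    subst hg
    show pvB_firstGreater _ j = _
    rw [pvB_firstGreater_eq _ _ (pvIds_sorted lst (-(lst.getD i 0 + lst.getD j 0)))]
    rw [List.find?_filter]
    have hsplit : List.range lst.length
        = List.range' 0 (j + 1) ++ List.range' (j + 1) (lst.length - (j + 1)) := by
      rw [List.range_eq_range']
      have h := List.range'_append (s := 0) (m := j + 1) (n := lst.length - (j + 1)) (step := 1)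
      simp only [Nat.zero_add, Nat.one_mul] at h
      rw [h]
      congr 1
      omega
    rw [hsplit, List.find?_append]
    have h1 : List.find? (fun a => decide ((decide (lst.getD a 0 = -(lst.getD i 0 + lst.getD j 0)) = true)
        ∧ (decide (j < a) = true))) (List.range' 0 (j + 1)) = none := by
      rw [List.find?_eq_none]
      intro x hx
      have hx' := List.mem_range'_1.mp hx
      simp only [decide_eq_true_eq]
      omega
    rw [h1, Option.none_or]
    simp only [pvInner]
    apply pvFind?_congr
    intro k hk
    have hk' := List.mem_range'_1.mp hk
    simp only [decide_eq_true_eq]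
    apply decide_eq_decide.mpr
    constructor
    · rintro ⟨h, _⟩; omega
    · intro h; constructor; omega; omega

lemma pvLoopJ_eq (lst : List Int) (i : Nat) (js : List Nat)
    (hjs : ∀ j ∈ js, j < lst.length) :
    pvA_loopJ lst lst.length i js =
      (pvB_loopJ lst (pvB_buildPos lst) i js).map (pvPack lst) := by
  induction js with
  | nil => simp [pvA_loopJ, pvB_loopJ]
  | cons j js ih =>
    have hj : j < lst.length := hjs j List.mem_cons_self
    have ihr := ih (fun x hx => hjs x (List.mem_cons_of_mem _ hx))
    have hkey := pvKey lst i j hj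
    rw [pvA_loopJ, pvB_loopJ, pvA_loopK_eq]
    cases hq : (pvB_buildPos lst).get? (-(lst.getD i 0 + lst.getD j 0)) with
    | none =>
      rw [hq] at hkey
      have hkey' : (none : Option Nat) = pvInner lst lst.length i j := hkey
      simp only [pvInner] at hkey'
      rw [← hkey']
      simpa using ihr
    | some ids =>
      rw [hq] at hkey
      have hkey' : pvB_firstGreater ids j = pvInner lst lst.length i j := hkey
      show (match Option.map (fun k => pvPack lst (i, j, k)) (pvInner lst lst.length i j) with
            | some r => some r
            | none => pvA_loopJ lst lst.length i js) =
          Option.map (pvPack lst)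
            (match pvB_firstGreater ids j with
             | some k => some (i, j, k)
             | none => pvB_loopJ lst (pvB_buildPos lst) i js)
      cases hf : pvB_firstGreater ids j with
      | none =>
        rw [hf] at hkey'
        rw [← hkey']
        simpa using ihr
      | some k =>
        rw [hf] at hkey'
        rw [← hkey']
        simp [pvPack]

lemma pvLoopI_eq (lst : List Int) (is : List Nat)
    (his : ∀ i ∈ is, i < lst.length) :
    pvA_loopI lst lst.length is =
      (pvB_loopI lst (pvB_buildPos lst) lst.length is).map (pvPack lst) := by
  induction is with
  | nil => simp [pvA_loopI, pvB_loopI]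
  | cons i is ih =>
    have hi : i < lst.length := his i List.mem_cons_self
    have ihr := ih (fun x hx => his x (List.mem_cons_of_mem _ hx))
    rw [pvA_loopI, pvB_loopI]
    rw [pvLoopJ_eq lst i _ (fun x hx => by
      have := List.mem_range'_1.mp hx
      omega)]
    cases hb : pvB_loopJ lst (pvB_buildPos lst) i (List.range' (i + 1) (lst.length - (i + 1))) with
    | none => simpa using ihr
    | some r => simp

-- ===== VERDICT (by name: the statement is the Claim_ definition above) =====
theorem uchta_yigindi_nol_spec : Claim_equal_uchta_yigindi_nol := by
  intro lst _
  unfold Spec_uchta_yigindi_nol uchta_yigindi_nol uchta_yigindi_nol_alt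
  simp only []
  rw [pvLoopI_eq lst _ (fun x hx => List.mem_range.mp hx)]
  cases hb : pvB_loopI lst (pvB_buildPos lst) lst.length (List.range lst.length) with
  | none => simp
  | some r =>
    obtain ⟨i, j, k⟩ := r
    have hfil : ((List.range lst.length).filter
          (fun m => !(PySem.Set.contains (PySem.Set.ofList [i, j, k]) m)))
        = ((List.range lst.length).filter (fun m => m != i && m != j && m != k)) := by
      apply List.filter_congr
      intro m _
      have hmem : m ∈ PySem.Set.ofList [i, j, k] ↔ m ∈ [i, j, k] := PySem.Set.mem_ofList _ _
      rw [Bool.eq_iff_iff]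
      simp [PySem.Set.contains, hmem]
      tauto
    simp only [Option.map_some, pvPack]
    rw [hfil]
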